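-- pv_equiv track=rewrite | github.com/g2santorini/sailing-santorini-ai-bot | app/services/message_type_detector.py | looks_like_question
-- ===== SOURCE A (Python) =====
-- def looks_like_question(text: str) -> bool:
--     question_starters = [
--         "what",
--         "which",
--         "who",
--         "how",
--         "when",
--         "where",
--         "can",
--         "could",
--         "do",
--         "does",
--         "is",
--         "are",
--         "will",
--         "would",
--         "should",
--     ]
--     return text.endswith("?") or any(text.startswith(starter + " ") for starter in question_starters)
-- ===== SOURCE B (Python) =====
-- QUESTION_STARTERS = [
--     "what", "which", "who", "how", "when", "where", "can", "could",
--     "do", "does", "is", "are", "will", "would", "should",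
-- ]
--
--
-- def looks_like_question(text: str) -> bool:
--     if text.endswith("?"):
--         return True
--     # parallel prefix matcher: walk the text character by character,
--     # pruning the surviving patterns; a pattern fully consumed => match
--     cands = [s + " " for s in QUESTION_STARTERS]
--     for ch in text:
--         cands = [p[1:] for p in cands if p and p[0] == ch]
--         if "" in cands:
--             return True
--         if not cands:
--             return False
--     return False
-- ===== Notes on version B (the rewrite author's own statement) =====
-- stated objective: alternative
-- what changed: A loops over the 15 starter patterns testing text.startswith on each; B runs a parallel prefix matcher that walks the text character by character, pruning the set of surviving patterns and reporting a match when one pattern is fully consumed.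
import Mathlib
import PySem

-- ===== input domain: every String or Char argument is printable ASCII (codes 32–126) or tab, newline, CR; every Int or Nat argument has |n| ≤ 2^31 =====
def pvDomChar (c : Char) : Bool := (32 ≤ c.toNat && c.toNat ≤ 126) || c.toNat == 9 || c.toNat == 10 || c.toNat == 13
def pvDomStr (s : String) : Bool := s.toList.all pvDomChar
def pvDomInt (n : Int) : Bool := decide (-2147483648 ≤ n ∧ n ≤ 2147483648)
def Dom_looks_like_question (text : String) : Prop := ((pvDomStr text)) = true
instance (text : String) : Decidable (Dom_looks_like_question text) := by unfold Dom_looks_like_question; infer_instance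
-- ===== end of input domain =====

-- B replaces A's per-starter startswith loop by a character-driven parallel prefix matcher over the text (alternative decomposition; same result).

-- ===== PORT A =====
def pvStartersA : List String :=
  ["what", "which", "who", "how", "when", "where", "can", "could",
   "do", "does", "is", "are", "will", "would", "should"]

def looks_like_question (text : String) : Bool :=
  PySem.Str.endswith text "?" ||
    pvStartersA.any (fun starter => PySem.Str.startswith text (starter ++ " "))

-- ===== PORT B =====
def QUESTION_STARTERS : List String :=
  ["what", "which", "who", "how", "when", "where", "can", "could",
   "do", "does", "is", "are", "will", "would", "should"]

-- the for-loop of Source B: prune surviving pattern suffixes per character, match when one empties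
def pvMatchLoop (cands : List (List Char)) : List Char → Bool
  | [] => false
  | ch :: rest =>
    let cands' := (cands.filter (fun p => p.head? == some ch)).map List.tail
    if cands'.contains ([] : List Char) then true
    else if cands'.isEmpty then false
    else pvMatchLoop cands' rest

def looks_like_question_alt (text : String) : Bool :=
  if PySem.Str.endswith text "?" then true
  else pvMatchLoop (QUESTION_STARTERS.map (fun s => (s ++ " ").toList)) text.toList

-- ===== PRECONDITION & SPEC =====
def Spec_looks_like_question (text : String) (out : Bool) : Prop := out = looks_like_question_alt text
instance (text : String) (out : Bool) : Decidable (Spec_looks_like_question text out) := by unfold Spec_looks_like_question; infer_instance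

-- ===== CLAIM =====
def Claim_equal_looks_like_question : Prop := ∀ (text : String), Dom_looks_like_question text → Spec_looks_like_question text (looks_like_question text)

-- ===== LEMMAS AND PROOFS =====

lemma pv_sw (l p : List Char) : PySem.Chars.startswith l p = p.isPrefixOf l := by
  rw [Bool.eq_iff_iff, PySem.Chars.startswith_iff, List.isPrefixOf_iff_prefix]

-- the matcher loop returns whether some nonempty candidate is a prefix of the remaining text
lemma pvMatchLoop_eq (l : List Char) : ∀ (cands : List (List Char)),
    pvMatchLoop cands l = cands.any (fun p => !p.isEmpty && p.isPrefixOf l) := by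
  induction l with
  | nil =>
    intro cands
    simp only [pvMatchLoop]
    rw [eq_comm, List.any_eq_false]
    rintro p hp
    cases p <;> simp [List.isPrefixOf]
  | cons ch rest ih =>
    intro cands
    simp only [pvMatchLoop]
    by_cases hc : (List.map List.tail (List.filter (fun p => p.head? == some ch) cands)).contains ([] : List Char) = true
    · rw [if_pos hc]
      symm
      rw [List.contains_iff_mem] at hc
      simp only [List.mem_map, List.mem_filter, beq_iff_eq] at hc
      rcases hc with ⟨p, ⟨hp, hh⟩, ht⟩
      cases p with
      | nil => simp at hh
      | cons a q =>
        simp only [List.head?_cons, Option.some.injEq] at hh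
        simp only [List.tail_cons] at ht
        subst ht
        rw [List.any_eq_true]
        exact ⟨[a], hp, by simp [List.isPrefixOf, hh]⟩
    · rw [if_neg hc]
      rw [show (if (List.map List.tail (List.filter (fun p => p.head? == some ch) cands)).isEmpty = true
            then false
            else pvMatchLoop (List.map List.tail (List.filter (fun p => p.head? == some ch) cands)) rest)
          = pvMatchLoop (List.map List.tail (List.filter (fun p => p.head? == some ch) cands)) rest from by
        by_cases h0 : (List.map List.tail (List.filter (fun p => p.head? == some ch) cands)).isEmpty = true
        · rw [if_pos h0, ih, List.isEmpty_iff.mp h0, List.any_nil]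
        · rw [if_neg h0]]
      rw [ih]
      rw [Bool.eq_iff_iff]
      simp only [List.any_eq_true, Bool.and_eq_true, Bool.not_eq_true',
        List.mem_map, List.mem_filter, beq_iff_eq]
      constructor
      · rintro ⟨q, ⟨p, ⟨hp, hh⟩, hq⟩, hqe, hpre⟩
        cases p with
        | nil => simp at hh
        | cons a t =>
          simp only [List.head?_cons, Option.some.injEq] at hh
          simp only [List.tail_cons] at hq
          refine ⟨a :: t, hp, by simp, ?_⟩
          simp [List.isPrefixOf, hh, hq, hpre]
      · rintro ⟨p, hp, hne, hpre⟩
        cases p with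
        | nil => simp at hne
        | cons a q =>
          simp only [List.isPrefixOf] at hpre
          rw [Bool.and_eq_true, beq_iff_eq] at hpre
          rcases hpre with ⟨rfl, hpre⟩
          cases q with
          | nil =>
            exact absurd (List.contains_iff_mem.mpr
              (List.mem_map.mpr ⟨[a], List.mem_filter.mpr ⟨hp, by simp⟩, rfl⟩)) hc
          | cons b t =>
            refine ⟨b :: t, ⟨a :: b :: t, ⟨hp, rfl⟩, rfl⟩, rfl, ?_⟩
            simpa [List.isPrefixOf] using hpre

lemma pv_starters_eq : QUESTION_STARTERS = pvStartersA := rfl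

-- ===== VERDICT =====
theorem looks_like_question_spec : Claim_equal_looks_like_question := by
  intro text _
  unfold Spec_looks_like_question looks_like_question looks_like_question_alt
  rw [pvMatchLoop_eq, pv_starters_eq]
  cases hE : PySem.Str.endswith text "?" with
  | true => simp
  | false =>
    simp only [Bool.false_or, if_neg (by simp : ¬ (false = true))]
    rw [List.any_map]
    apply congrArg
    funext st
    simp [Function.comp, PySem.Str.startswith_eq, pv_sw]
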